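-- pv_equiv track=rewrite | github.com/alexandraback/datacollection | solutions_5753053697277952_0/Python/MrRoach/main.py | evac
-- ===== SOURCE A (Python) =====
-- def takeOneAction(a):
-- 	maxNum = max(a)
-- 	maxInd = [i for i in range(len(a)) if a[i] == maxNum]
-- 	if maxNum == 1 and len(maxInd) == 3:
-- 		return maxInd[0 : 1]
-- 	else:
-- 		return maxInd[0 : 2]
--
-- def evac(a):
-- 	results = []
-- 	while max(a) > 0:
-- 		res = takeOneAction(a)
-- 		for i in res:
-- 			a[i] -= 1
-- 		results += [''.join(chr(65 + k) for k in res)]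
-- 	return results
-- ===== SOURCE B (Python) =====
-- # B: instead of re-scanning for the max before every action, process value levels
-- # M, M-1, ..., 1 top-down: at level v the indices with a[i] >= v are exactly the
-- # ones an action at that level can touch, in ascending order; emit them in chunks
-- # of two (with the 3-ones special rule at level 1).  Mutates a like A (positive
-- # entries end at 0).
-- def evac(a):
--     M = max(a)
--     results = []
--     for v in range(M, 1, -1):
--         s = [i for i in range(len(a)) if a[i] >= v]
--         while s:
--             results.append(''.join(chr(65 + k) for k in s[:2]))
--             s = s[2:]
--     s = [i for i in range(len(a)) if a[i] >= 1]
--     while s: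
--         step = 1 if len(s) == 3 else 2
--         results.append(''.join(chr(65 + k) for k in s[:step]))
--         s = s[step:]
--     for i in range(len(a)):
--         if a[i] > 0:
--             a[i] = 0
--     return results
-- ===== Notes on version B (the rewrite author's own statement) =====
-- stated objective: faster
-- what changed: Replaces the per-action rescans (max + full index comprehension each iteration) by a single top-down sweep over value levels M..1: at each level the eligible indices are computed once and emitted in chunks of two (with the 3-ones rule at level 1).
-- outside the precondition, e.g. on evac([]): A raises ValueError, B raises ValueError
import Mathlib
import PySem

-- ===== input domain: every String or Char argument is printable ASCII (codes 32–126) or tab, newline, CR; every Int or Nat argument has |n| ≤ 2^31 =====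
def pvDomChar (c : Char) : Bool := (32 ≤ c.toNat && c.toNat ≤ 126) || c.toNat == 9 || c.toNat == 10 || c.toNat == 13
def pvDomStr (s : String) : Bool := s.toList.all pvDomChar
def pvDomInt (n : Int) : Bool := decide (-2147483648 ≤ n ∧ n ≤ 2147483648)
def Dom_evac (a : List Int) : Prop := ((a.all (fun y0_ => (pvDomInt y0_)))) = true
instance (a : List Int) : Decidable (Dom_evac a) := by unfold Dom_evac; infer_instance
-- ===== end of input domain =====

-- B changes the algorithm (level sweep instead of per-action rescan); equivalence is about the
-- return value, and both Pythons also mutate `a` in place the same way (positive entries to 0).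

-- ===== PORT A =====
-- max(a) (no key); `.getD 0` is unreachable junk: Pre_evac excludes a = [] (ValueError)
def pyMax (a : List Int) : Int := (PySem.List.max? a (fun x => x)).getD 0

-- ''.join(chr(65 + k) for k in res); chr ported as Char.ofNat (indices are small nonneg Nats cast to Int)
def joinChrA (res : List Int) : String := String.ofList (res.map (fun k => Char.ofNat (65 + k).toNat))

def takeOneAction (a : List Int) : List Int :=
  let maxNum := pyMax a
  let maxInd := (PySem.List.pyRange 0 a.length 1).filter (fun i => PySem.List.pyGetD a i 0 == maxNum)
  if maxNum == 1 && maxInd.length == 3 then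
    PySem.List.slice maxInd (some 0) (some 1)
  else
    PySem.List.slice maxInd (some 0) (some 2)

-- the while-loop; fuel = (sum of positive parts) + 1 strictly dominates the number of
-- iterations (each action decrements at least one positive entry), so the port is A's loop
def evacLoop : Nat → List Int → List String → List String
  | 0, _, results => results
  | fuel + 1, a, results =>
    if pyMax a > 0 then
      let res := takeOneAction a
      let a' := res.foldl (fun acc i => PySem.List.pySetD acc i (PySem.List.pyGetD acc i 0 - 1)) a
      evacLoop fuel a' (results ++ [joinChrA res])
    else results

def evac (a : List Int) : List String :=
  evacLoop ((a.map Int.toNat).sum + 1) a []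

-- ===== PORT B =====
-- max(a) as B computes it (same builtin)
def pyMaxB (a : List Int) : Int := (PySem.List.max? a (fun x => x)).getD 0

def joinChrB (res : List Int) : String := String.ofList (res.map (fun k => Char.ofNat (65 + k).toNat))

-- [i for i in range(len(a)) if a[i] >= v]
def idxGe (a : List Int) (v : Int) : List Int :=
  (PySem.List.pyRange 0 a.length 1).filter (fun i => decide (v ≤ PySem.List.pyGetD a i 0))

-- the inner `while s: emit s[:2]; s = s[2:]` (s[:2]/s[2:] with literal nonneg bounds = take/drop)
def chunk2 {α : Type} : List α → List (List α)
  | [] => []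
  | [x] => [[x]]
  | x :: y :: rest => [x, y] :: chunk2 rest

-- the level-1 `while s: step = 1 if len(s)==3 else 2; emit s[:step]; s = s[step:]`
def chunkOnes {α : Type} : List α → List (List α)
  | [] => []
  | [x] => [[x]]
  | [x, y] => [[x, y]]
  | [x, y, z] => [[x], [y, z]]
  | x :: y :: r1 :: r2 :: rest => [x, y] :: chunkOnes (r1 :: r2 :: rest)

def evac_alt (a : List Int) : List String :=
  let M := pyMaxB a
  let res1 := (PySem.List.pyRange M 1 (-1)).foldl
    (fun acc v => acc ++ (chunk2 (idxGe a v)).map joinChrB) []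
  res1 ++ (chunkOnes (idxGe a 1)).map joinChrB

-- ===== PRECONDITION & SPEC =====
-- a = [] is excluded: Python's max([]) raises ValueError (in both A and B)
def Pre_evac (a : List Int) : Prop := a ≠ []
instance (a : List Int) : Decidable (Pre_evac a) := by unfold Pre_evac; infer_instance
def pvWitness_evac : List Int := [1, 2, 0, 2]

def Spec_evac (a : List Int) (out : List String) : Prop := out = evac_alt a
instance (a : List Int) (out : List String) : Decidable (Spec_evac a out) := by unfold Spec_evac; infer_instance

-- ===== CLAIM (what is proved, stated in full; the proofs are below) =====
def Claim_equal_evac : Prop := ∀ (a : List Int), Dom_evac a → Pre_evac a → Spec_evac a (evac a)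


-- ===== LEMMAS AND PROOFS =====

-- Nat-side view of the index filters and of the decrement, used only by the proofs.
def idxGeN (a : List Int) (v : Int) : List Nat :=
  (List.range a.length).filter (fun j => decide (v ≤ a.getD j 0))

def kOf (a : List Int) : Nat :=
  if pyMax a = 1 ∧ (idxGeN a (pyMax a)).length = 3 then 1 else 2

def decN (a : List Int) (t : List Nat) : List Int :=
  t.foldl (fun acc j => acc.set j (acc.getD j 0 - 1)) a

def joinN (res : List Nat) : String := String.ofList (res.map (fun k => Char.ofNat (65 + k)))

def sumPos (a : List Int) : Nat := (a.map Int.toNat).sum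

lemma mem_idxGeN {a : List Int} {v : Int} {j : Nat} :
    j ∈ idxGeN a v ↔ j < a.length ∧ v ≤ a.getD j 0 := by
  simp [idxGeN, List.mem_filter, List.mem_range]

lemma pyMax_spec {a : List Int} (h : a ≠ []) :
    pyMax a ∈ a ∧ ∀ x ∈ a, x ≤ pyMax a := by
  match a, h with
  | x :: t, _ =>
    have hmax : pyMax (x :: t) = t.foldl max x := by
      simp [pyMax, PySem.List.max?_id_cons]
    refine ⟨?_, ?_⟩
    · rw [hmax]
      rcases PySem.List.foldl_max_mem t x with h1 | h1
      · rw [h1]; exact List.mem_cons_self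
      · exact List.mem_cons_of_mem _ h1
    · intro y hy
      rw [hmax]
      rcases List.mem_cons.1 hy with rfl | hy
      · exact (PySem.List.le_foldl_max t y).1
      · exact (PySem.List.le_foldl_max t x).2 y hy

lemma pyMax_eq {a : List Int} {M : Int} (h : a ≠ []) (hM : M ∈ a)
    (hle : ∀ x ∈ a, x ≤ M) : pyMax a = M :=
  le_antisymm (hle _ (pyMax_spec h).1) ((pyMax_spec h).2 M hM)

lemma getD_le_pyMax {a : List Int} (h : a ≠ []) {j : Nat} (hj : j < a.length) :
    a.getD j 0 ≤ pyMax a := by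
  rw [List.getD_eq_getElem a 0 hj]
  exact (pyMax_spec h).2 _ (List.getElem_mem hj)

lemma getD_of_mem_idxGeN_max {a : List Int} (h : a ≠ []) {j : Nat}
    (hj : j ∈ idxGeN a (pyMax a)) : a.getD j 0 = pyMax a := by
  rcases mem_idxGeN.1 hj with ⟨hlt, hge⟩
  exact le_antisymm (getD_le_pyMax h hlt) hge

lemma idxGeN_max_ne_nil {a : List Int} (h : a ≠ []) :
    idxGeN a (pyMax a) ≠ [] := by
  rcases List.mem_iff_getElem.1 (pyMax_spec h).1 with ⟨j, hj, hjv⟩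
  have : j ∈ idxGeN a (pyMax a) := by
    refine mem_idxGeN.2 ⟨hj, ?_⟩
    rw [List.getD_eq_getElem a 0 hj, hjv]
  exact List.ne_nil_of_mem this

lemma idxGeN_nodup (a : List Int) (v : Int) : (idxGeN a v).Nodup :=
  (List.nodup_range).filter _

lemma idxGe_eq (a : List Int) (v : Int) :
    idxGe a v = (idxGeN a v).map Int.ofNat := by
  unfold idxGe idxGeN
  rw [PySem.List.pyRange_one, List.filter_map]
  simp [Function.comp_def, Int.ofNat_eq_natCast]

lemma chunk2_map {α β : Type} (f : α → β) (l : List α) :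
    chunk2 (l.map f) = (chunk2 l).map (List.map f) := by
  induction l using chunk2.induct with
  | case1 => simp [chunk2]
  | case2 x => simp [chunk2]
  | case3 x y rest ih => simp [chunk2, ih]

lemma chunkOnes_map {α β : Type} (f : α → β) (l : List α) :
    chunkOnes (l.map f) = (chunkOnes l).map (List.map f) := by
  induction l using chunkOnes.induct with
  | case1 => simp [chunkOnes]
  | case2 x => simp [chunkOnes]
  | case3 x y => simp [chunkOnes]
  | case4 x y z => simp [chunkOnes]
  | case5 x y r1 r2 rest ih => simpa [chunkOnes] using ih

lemma joinChrB_map_cast (res : List Nat) :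
    joinChrB (res.map Int.ofNat) = joinN res := by
  unfold joinChrB joinN
  rw [List.map_map]
  refine congrArg String.ofList (List.map_congr_left ?_)
  intro j _
  simp only [Function.comp_apply]
  have h65 : ((65 : Int) + Int.ofNat j).toNat = 65 + j := by
    simp only [Int.ofNat_eq_natCast]; omega
  rw [h65]

lemma evac_alt_eq (a : List Int) :
    evac_alt a = (PySem.List.pyRange (pyMax a) 1 (-1)).flatMap
        (fun v => (chunk2 (idxGeN a v)).map joinN)
      ++ (chunkOnes (idxGeN a 1)).map joinN := by
  simp only [evac_alt]
  rw [show pyMaxB a = pyMax a from rfl]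
  rw [PySem.List.foldl_append_eq_flatMap, List.nil_append]
  have hfun : (fun v => (chunk2 (idxGe a v)).map joinChrB)
      = (fun v => (chunk2 (idxGeN a v)).map joinN) := by
    funext v
    rw [idxGe_eq, chunk2_map, List.map_map]
    exact List.map_congr_left (fun x _ => joinChrB_map_cast x)
  rw [hfun, idxGe_eq, chunkOnes_map, List.map_map]
  congr 1
  exact List.map_congr_left (fun x _ => joinChrB_map_cast x)

lemma takeOneAction_eq {a : List Int} (h : a ≠ []) :
    takeOneAction a = ((idxGeN a (pyMax a)).take (kOf a)).map Int.ofNat := by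
  have hInd : (PySem.List.pyRange 0 (a.length : Int) 1).filter
        (fun i => PySem.List.pyGetD a i 0 == pyMax a)
      = (idxGeN a (pyMax a)).map Int.ofNat := by
    rw [PySem.List.pyRange_one, List.filter_map]
    have hpred : ∀ j ∈ List.range ((a.length : Int) - 0).toNat,
        ((fun i => PySem.List.pyGetD a i 0 == pyMax a) ∘ (fun k : Nat => (0 : Int) + ↑k)) j
          = (fun j : Nat => decide (pyMax a ≤ a.getD j 0)) j := by
      intro j hj
      have hj' : j < a.length := by
        have := List.mem_range.1 hj
        omega
      simp only [Function.comp_apply, zero_add, PySem.List.pyGetD_natCast]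
      have hle := getD_le_pyMax h hj'
      by_cases he : a.getD j 0 = pyMax a
      · rw [he]; simp
      · have h2 : ¬ (pyMax a ≤ a.getD j 0) := by omega
        rw [decide_eq_false h2, beq_eq_false_iff_ne.2 he]
    rw [List.filter_congr hpred]
    have hlen : ((a.length : Int) - 0).toNat = a.length := by omega
    rw [hlen]
    unfold idxGeN
    refine List.map_congr_left ?_
    intro j _
    simp [Int.ofNat_eq_natCast]
  simp only [takeOneAction]
  rw [hInd, List.length_map]
  by_cases hc : pyMax a = 1 ∧ (idxGeN a (pyMax a)).length = 3
  · have hc2 := hc.2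
    rw [hc.1] at hc2
    have hcond : (pyMax a == 1 && ((idxGeN a (pyMax a)).length == 3)) = true := by
      simp [hc.1, hc2]
    rw [hcond, if_pos rfl]
    rw [PySem.List.slice_zero_start, PySem.List.slice_to _ (by norm_num)]
    rw [show ((1 : Int)).toNat = 1 from rfl, ← List.map_take]
    unfold kOf
    rw [if_pos hc]
  · have hcond : (pyMax a == 1 && ((idxGeN a (pyMax a)).length == 3)) = false := by
      rcases Decidable.not_and_iff_not_or_not.1 hc with h1 | h1 <;> simp [h1]
    rw [hcond]
    simp only [Bool.false_eq_true, if_false]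
    rw [PySem.List.slice_zero_start, PySem.List.slice_to _ (by norm_num)]
    rw [show ((2 : Int)).toNat = 2 from rfl, ← List.map_take]
    unfold kOf
    rw [if_neg hc]

lemma dec_bridge (a : List Int) (t : List Nat) :
    (t.map Int.ofNat).foldl
      (fun acc i => PySem.List.pySetD acc i (PySem.List.pyGetD acc i 0 - 1)) a = decN a t := by
  rw [List.foldl_map]
  unfold decN
  congr 1
  funext acc j
  simp

lemma decN_length (a : List Int) (t : List Nat) : (decN a t).length = a.length := by
  induction t generalizing a with
  | nil => rfl
  | cons i t ih => simpa [decN] using (ih (a.set i (a.getD i 0 - 1))).trans (by simp)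

lemma getD_set_ne {a : List Int} {i j : Nat} (h : i ≠ j) (v : Int) :
    (a.set i v).getD j 0 = a.getD j 0 := by
  simp [List.getD_eq_getElem?_getD, List.getElem?_set_ne h]

lemma getD_set_self {a : List Int} {i : Nat} (h : i < a.length) (v : Int) :
    (a.set i v).getD i 0 = v := by
  simp [List.getD_eq_getElem?_getD, h]

lemma decN_getD {a : List Int} {t : List Nat} (ht : t.Nodup)
    (hlt : ∀ j ∈ t, j < a.length) (j : Nat) :
    (decN a t).getD j 0 = if j ∈ t then a.getD j 0 - 1 else a.getD j 0 := by
  induction t generalizing a with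
  | nil => simp [decN]
  | cons i t ih =>
    have hstep : decN a (i :: t) = decN (a.set i (a.getD i 0 - 1)) t := rfl
    have hi : i < a.length := hlt i List.mem_cons_self
    have hne : i ∉ t := (List.nodup_cons.1 ht).1
    rw [hstep, ih (List.nodup_cons.1 ht).2
      (by intro x hx; rw [List.length_set]; exact hlt x (List.mem_cons_of_mem _ hx))]
    by_cases hji : j = i
    · subst hji
      rw [if_neg hne, if_pos List.mem_cons_self, getD_set_self hi]
    · by_cases hjt : j ∈ t
      · rw [if_pos hjt, if_pos (List.mem_cons_of_mem _ hjt),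
          getD_set_ne (fun he => hji he.symm)]
      · rw [if_neg hjt, if_neg (by simp [hji, hjt]), getD_set_ne (fun he => hji he.symm)]

lemma sumPos_set (a : List Int) (j : Nat) (v : Int) (hj : j < a.length) :
    sumPos (a.set j v) + (a.getD j 0).toNat = sumPos a + v.toNat := by
  induction a generalizing j with
  | nil => simp at hj
  | cons x t ih =>
    cases j with
    | zero => simp [sumPos]; omega
    | succ j =>
      have := ih j (by simpa using hj)
      simp [sumPos] at this ⊢
      omega

lemma filter_not_mem_take {l : List Nat} (h : l.Nodup) (k : Nat) :
    l.filter (fun j => !decide (j ∈ l.take k)) = l.drop k := by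
  have hn : (l.take k ++ l.drop k).Nodup := by rw [List.take_append_drop]; exact h
  have hd : ∀ x ∈ l.drop k, x ∉ l.take k := by
    intro x hx hx'
    exact (List.disjoint_of_nodup_append hn) hx' hx
  have h0 : l.filter (fun j => !decide (j ∈ l.take k))
      = (l.take k ++ l.drop k).filter (fun j => !decide (j ∈ l.take k)) := by
    rw [List.take_append_drop]
  rw [h0, List.filter_append]
  have h1 : (l.take k).filter (fun j => !decide (j ∈ l.take k)) = [] :=
    List.filter_eq_nil_iff.2 (by intro x hx; simp [hx])
  have h2 : (l.drop k).filter (fun j => !decide (j ∈ l.take k)) = l.drop k :=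
    List.filter_eq_self.2 (by intro x hx; simp [hd x hx])
  rw [h1, h2, List.nil_append]

lemma mem_take_idx {a : List Int} (h : a ≠ []) {j : Nat}
    (hj : j ∈ (idxGeN a (pyMax a)).take (kOf a)) :
    j < a.length ∧ a.getD j 0 = pyMax a := by
  have hjS : j ∈ idxGeN a (pyMax a) := List.mem_of_mem_take hj
  exact ⟨(mem_idxGeN.1 hjS).1, getD_of_mem_idxGeN_max h hjS⟩

lemma take_idx_nodup (a : List Int) : ((idxGeN a (pyMax a)).take (kOf a)).Nodup :=
  (List.take_sublist _ _).nodup (idxGeN_nodup a (pyMax a))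

lemma idxGeN_decN_congr (a : List Int) (t : List Nat) (ht : t.Nodup)
    (hlt : ∀ j ∈ t, j < a.length) (v : Int)
    (hsame : ∀ j ∈ t, decide (v ≤ a.getD j 0 - 1) = decide (v ≤ a.getD j 0)) :
    idxGeN (decN a t) v = idxGeN a v := by
  unfold idxGeN
  rw [decN_length]
  refine List.filter_congr ?_
  intro j hj
  rw [decN_getD ht hlt j]
  by_cases hjt : j ∈ t
  · rw [if_pos hjt]; exact hsame j hjt
  · rw [if_neg hjt]

lemma idxGeN_decN_lower {a : List Int} (h : a ≠ [])
    {v : Int} (hv : v ≤ pyMax a - 1) :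
    idxGeN (decN a ((idxGeN a (pyMax a)).take (kOf a))) v = idxGeN a v := by
  refine idxGeN_decN_congr a _ (take_idx_nodup a) (fun x hx => (mem_take_idx h hx).1) v ?_
  intro j hj
  have hv1 := (mem_take_idx h hj).2
  have h1 : v ≤ a.getD j 0 - 1 := by omega
  have h2 : v ≤ a.getD j 0 := by omega
  rw [decide_eq_true h1, decide_eq_true h2]

lemma idxGeN_decN_max {a : List Int} (h : a ≠ []) :
    idxGeN (decN a ((idxGeN a (pyMax a)).take (kOf a))) (pyMax a)
      = (idxGeN a (pyMax a)).drop (kOf a) := by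
  have hstep : ∀ (t : List Nat), t.Nodup → (∀ j ∈ t, j < a.length) →
      (∀ j ∈ t, a.getD j 0 = pyMax a) →
      idxGeN (decN a t) (pyMax a)
        = (List.range a.length).filter
            (fun j => !decide (j ∈ t) && decide (pyMax a ≤ a.getD j 0)) := by
    intro t ht hlt hval
    unfold idxGeN
    rw [decN_length]
    refine List.filter_congr ?_
    intro j hj
    rw [decN_getD ht hlt j]
    by_cases hjt : j ∈ t
    · have hv1 := hval j hjt
      have h1 : ¬ (pyMax a ≤ a.getD j 0 - 1) := by omega
      rw [if_pos hjt, decide_eq_false h1, decide_eq_true hjt]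
      rfl
    · rw [if_neg hjt, decide_eq_false hjt]
      rfl
  rw [hstep _ (take_idx_nodup a) (fun x hx => (mem_take_idx h hx).1)
    (fun x hx => (mem_take_idx h hx).2), ← List.filter_filter]
  exact filter_not_mem_take (idxGeN_nodup a (pyMax a)) (kOf a)

lemma kOf_pos (a : List Int) : kOf a ≠ 0 := by
  unfold kOf; split_ifs <;> simp

lemma take_idx_ne_nil {a : List Int} (h : a ≠ []) :
    (idxGeN a (pyMax a)).take (kOf a) ≠ [] := by
  intro he
  rcases List.take_eq_nil_iff.1 he with h0 | h0
  · exact kOf_pos a h0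
  · exact idxGeN_max_ne_nil h h0

lemma pyMax_decN {a : List Int} (h : a ≠ []) :
    pyMax (decN a ((idxGeN a (pyMax a)).take (kOf a)))
      = if (idxGeN a (pyMax a)).drop (kOf a) = [] then pyMax a - 1 else pyMax a := by
  set S := idxGeN a (pyMax a) with hSdef
  set t := S.take (kOf a) with htdef
  set a' := decN a t with ha'def
  have htn : t.Nodup := take_idx_nodup a
  have htl : ∀ x ∈ t, x < a.length := fun x hx => (mem_take_idx h hx).1
  have hlen : a'.length = a.length := decN_length a t
  have hne' : a' ≠ [] := by
    intro he
    apply h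
    have : a.length = 0 := by rw [← hlen, he]; rfl
    exact List.eq_nil_of_length_eq_zero this
  have hpt : ∀ j : Nat, a'.getD j 0 = if j ∈ t then a.getD j 0 - 1 else a.getD j 0 :=
    decN_getD htn htl
  have hmem_a' : ∀ x ∈ a', ∃ j : Nat, j < a.length ∧ a'.getD j 0 = x := by
    intro x hx
    rcases List.mem_iff_getElem.1 hx with ⟨j, hj, hjv⟩
    refine ⟨j, by omega, ?_⟩
    rw [List.getD_eq_getElem a' 0 hj, hjv]
  by_cases hrest : S.drop (kOf a) = []
  · have hSt : S = t := by
      have h1 := List.take_append_drop (kOf a) S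
      rw [hrest, List.append_nil] at h1
      exact h1.symm
    have hub : ∀ x ∈ a', x ≤ pyMax a - 1 := by
      intro x hx
      rcases hmem_a' x hx with ⟨j, hj, hjv⟩
      rw [hpt j] at hjv
      by_cases hjt : j ∈ t
      · rw [if_pos hjt] at hjv
        have := (mem_take_idx h hjt).2
        omega
      · rw [if_neg hjt] at hjv
        have hjS : j ∉ S := by rw [hSt]; exact hjt
        have : ¬ (pyMax a ≤ a.getD j 0) := fun hc => hjS (mem_idxGeN.2 ⟨hj, hc⟩)
        omega
    obtain ⟨i, hi⟩ := List.exists_mem_of_ne_nil t (take_idx_ne_nil h)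
    have hiv : a'.getD i 0 = pyMax a - 1 := by
      rw [hpt i, if_pos hi, (mem_take_idx h hi).2]
    have hil : i < a'.length := by rw [hlen]; exact htl i hi
    have hmem : pyMax a - 1 ∈ a' := by
      rw [List.getD_eq_getElem a' 0 hil] at hiv
      exact List.mem_iff_getElem.2 ⟨i, hil, hiv⟩
    rw [if_pos hrest]
    exact pyMax_eq hne' hmem hub
  · obtain ⟨j, hj⟩ := List.exists_mem_of_ne_nil _ hrest
    have hjS : j ∈ S := List.mem_of_mem_drop hj
    have hjnt : j ∉ t := by
      intro hjt
      have hnd : (S.take (kOf a) ++ S.drop (kOf a)).Nodup := by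
        rw [List.take_append_drop]; exact idxGeN_nodup a (pyMax a)
      exact (List.disjoint_of_nodup_append hnd) hjt hj
    have hub : ∀ x ∈ a', x ≤ pyMax a := by
      intro x hx
      rcases hmem_a' x hx with ⟨j', hj', hjv⟩
      rw [hpt j'] at hjv
      have := getD_le_pyMax h hj'
      by_cases hjt : j' ∈ t
      · rw [if_pos hjt] at hjv; omega
      · rw [if_neg hjt] at hjv; omega
    have hjv : a'.getD j 0 = pyMax a := by
      rw [hpt j, if_neg hjnt]
      exact getD_of_mem_idxGeN_max h hjS
    have hjl : j < a'.length := by rw [hlen]; exact (mem_idxGeN.1 hjS).1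
    have hmem : pyMax a ∈ a' := by
      rw [List.getD_eq_getElem a' 0 hjl] at hjv
      exact List.mem_iff_getElem.2 ⟨j, hjl, hjv⟩
    rw [if_neg hrest]
    exact pyMax_eq hne' hmem hub

lemma chunk2_cons {α : Type} {l : List α} (h : l ≠ []) :
    chunk2 l = l.take 2 :: chunk2 (l.drop 2) := by
  match l, h with
  | [x], _ => rfl
  | x :: y :: r, _ => rfl

lemma chunkOnes_cons {α : Type} {l : List α} (h : l ≠ []) :
    chunkOnes l = l.take (if l.length = 3 then 1 else 2)
      :: chunkOnes (l.drop (if l.length = 3 then 1 else 2)) := by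
  match l, h with
  | [x], _ => rfl
  | [x, y], _ => rfl
  | [x, y, z], _ => rfl
  | x :: y :: r1 :: r2 :: rest, _ =>
    rw [if_neg (by simp)]
    rfl

lemma evac_alt_nil {a : List Int} (h : a ≠ []) (hm : pyMax a ≤ 0) :
    evac_alt a = [] := by
  rw [evac_alt_eq]
  have h1 : PySem.List.pyRange (pyMax a) 1 (-1) = [] :=
    PySem.List.pyRange_neg_one_eq_nil (by omega)
  have h2 : idxGeN a 1 = [] := by
    refine List.filter_eq_nil_iff.2 ?_
    intro j hj
    have := getD_le_pyMax h (List.mem_range.1 hj)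
    simp only [decide_eq_true_eq]
    omega
  rw [h1, h2]
  rfl

lemma B_step {a : List Int} (h : a ≠ []) (hm : 1 ≤ pyMax a) :
    evac_alt a = joinN ((idxGeN a (pyMax a)).take (kOf a))
      :: evac_alt (decN a ((idxGeN a (pyMax a)).take (kOf a))) := by
  have hSne : idxGeN a (pyMax a) ≠ [] := idxGeN_max_ne_nil h
  have hlen : (decN a ((idxGeN a (pyMax a)).take (kOf a))).length = a.length :=
    decN_length _ _
  have hne' : decN a ((idxGeN a (pyMax a)).take (kOf a)) ≠ [] := by
    intro he
    apply h
    apply List.eq_nil_of_length_eq_zero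
    rw [← hlen, he]
    rfl
  rw [evac_alt_eq a, evac_alt_eq (decN a ((idxGeN a (pyMax a)).take (kOf a)))]
  rcases eq_or_lt_of_le hm with hm1 | hm2
  · -- pyMax a = 1
    have hm1 : pyMax a = 1 := hm1.symm
    have hr1 : PySem.List.pyRange (pyMax a) 1 (-1) = [] :=
      PySem.List.pyRange_neg_one_eq_nil (by omega)
    have hk : kOf a = if (idxGeN a (pyMax a)).length = 3 then 1 else 2 := by
      unfold kOf
      by_cases h3 : (idxGeN a (pyMax a)).length = 3
      · rw [if_pos ⟨hm1, h3⟩, if_pos h3]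
      · rw [if_neg (fun hc => h3 hc.2), if_neg h3]
    have hS1 : idxGeN a 1 = idxGeN a (pyMax a) := by rw [hm1]
    have hchunk : chunkOnes (idxGeN a (pyMax a))
        = (idxGeN a (pyMax a)).take (kOf a) :: chunkOnes ((idxGeN a (pyMax a)).drop (kOf a)) := by
      rw [hk]; exact chunkOnes_cons hSne
    have hrest1 : idxGeN (decN a ((idxGeN a (pyMax a)).take (kOf a))) 1
        = (idxGeN a (pyMax a)).drop (kOf a) := by
      rw [show (1 : Int) = pyMax a from hm1.symm, idxGeN_decN_max h]
    have hmax' := pyMax_decN h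
    by_cases hrest : (idxGeN a (pyMax a)).drop (kOf a) = []
    · rw [if_pos hrest] at hmax'
      have hr2 : PySem.List.pyRange (pyMax (decN a ((idxGeN a (pyMax a)).take (kOf a)))) 1 (-1) = [] :=
        PySem.List.pyRange_neg_one_eq_nil (by omega)
      rw [hr1, hr2, hS1, hchunk, hrest1, hrest]
      simp [chunkOnes]
    · rw [if_neg hrest] at hmax'
      have hr2 : PySem.List.pyRange (pyMax (decN a ((idxGeN a (pyMax a)).take (kOf a)))) 1 (-1) = [] :=
        PySem.List.pyRange_neg_one_eq_nil (by omega)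
      rw [hr1, hr2, hS1, hchunk, hrest1]
      simp
  · -- 2 ≤ pyMax a
    have hk2 : kOf a = 2 := by
      unfold kOf
      rw [if_neg (fun hc => by omega)]
    have hr : PySem.List.pyRange (pyMax a) 1 (-1)
        = pyMax a :: PySem.List.pyRange (pyMax a - 1) 1 (-1) :=
      PySem.List.pyRange_neg_one_cons (by omega)
    have hchunk : chunk2 (idxGeN a (pyMax a))
        = (idxGeN a (pyMax a)).take (kOf a) :: chunk2 ((idxGeN a (pyMax a)).drop (kOf a)) := by
      rw [hk2]; exact chunk2_cons hSne
    have hlow : ∀ v ∈ PySem.List.pyRange (pyMax a - 1) 1 (-1),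
        (chunk2 (idxGeN (decN a ((idxGeN a (pyMax a)).take (kOf a))) v)).map joinN
          = (chunk2 (idxGeN a v)).map joinN := by
      intro v hv
      have hv' := (PySem.List.mem_pyRange_neg_one.1 hv)
      rw [idxGeN_decN_lower h (v := v) (by omega)]
    have hones : idxGeN (decN a ((idxGeN a (pyMax a)).take (kOf a))) 1 = idxGeN a 1 :=
      idxGeN_decN_lower h (by omega)
    have hmaxS : idxGeN (decN a ((idxGeN a (pyMax a)).take (kOf a))) (pyMax a)
        = (idxGeN a (pyMax a)).drop (kOf a) := idxGeN_decN_max h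
    have hmax' := pyMax_decN h
    by_cases hrest : (idxGeN a (pyMax a)).drop (kOf a) = []
    · rw [if_pos hrest] at hmax'
      rw [hr, List.flatMap_cons, hchunk, hrest, hmax', hones,
        List.flatMap_congr hlow]
      simp [chunk2]
    · rw [if_neg hrest] at hmax'
      have hr' : PySem.List.pyRange (pyMax (decN a ((idxGeN a (pyMax a)).take (kOf a)))) 1 (-1)
          = pyMax a :: PySem.List.pyRange (pyMax a - 1) 1 (-1) := by
        rw [hmax']
        exact PySem.List.pyRange_neg_one_cons (by omega)
      rw [hr, hr', List.flatMap_cons, List.flatMap_cons, hchunk, hmaxS, hones,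
        List.flatMap_congr hlow]
      simp

lemma sumPos_pos {a : List Int} (h : a ≠ []) (hm : 1 ≤ pyMax a) : 1 ≤ sumPos a := by
  have hmem : (pyMax a).toNat ∈ a.map Int.toNat := List.mem_map_of_mem (pyMax_spec h).1
  have := List.le_sum_of_mem hmem
  unfold sumPos
  omega

lemma sumPos_decN_le (t : List Nat) : ∀ (a : List Int), (∀ j ∈ t, j < a.length) →
    sumPos (decN a t) ≤ sumPos a := by
  induction t with
  | nil => intro a _; exact le_rfl
  | cons i t ih =>
    intro a hlt
    have hi : i < a.length := hlt i List.mem_cons_self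
    have hstep : decN a (i :: t) = decN (a.set i (a.getD i 0 - 1)) t := rfl
    have h1 := sumPos_set a i (a.getD i 0 - 1) hi
    have h2 := ih (a.set i (a.getD i 0 - 1))
      (by intro x hx; rw [List.length_set]; exact hlt x (List.mem_cons_of_mem _ hx))
    rw [hstep]
    omega

lemma sumPos_decN_lt {a : List Int} (h : a ≠ []) (hm : 1 ≤ pyMax a) :
    sumPos (decN a ((idxGeN a (pyMax a)).take (kOf a))) < sumPos a := by
  obtain ⟨i, t', ht⟩ := List.exists_cons_of_ne_nil (take_idx_ne_nil h)
  have hi : i ∈ (idxGeN a (pyMax a)).take (kOf a) := by rw [ht]; exact List.mem_cons_self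
  have hiv := (mem_take_idx h hi).2
  have hil := (mem_take_idx h hi).1
  have hstep : decN a ((idxGeN a (pyMax a)).take (kOf a))
      = decN (a.set i (a.getD i 0 - 1)) t' := by rw [ht]; rfl
  have h1 := sumPos_set a i (a.getD i 0 - 1) hil
  have h2 := sumPos_decN_le t' (a.set i (a.getD i 0 - 1))
    (by intro x hx
        rw [List.length_set]
        have : x ∈ (idxGeN a (pyMax a)).take (kOf a) := by
          rw [ht]; exact List.mem_cons_of_mem _ hx
        exact (mem_take_idx h this).1)
  rw [hstep]
  omega

lemma joinChrA_eq (t : List Nat) : joinChrA (t.map Int.ofNat) = joinN t :=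
  joinChrB_map_cast t

lemma loop_eq (n : Nat) : ∀ (a : List Int) (res : List String), a ≠ [] → sumPos a ≤ n →
    evacLoop (n + 1) a res = res ++ evac_alt a := by
  induction n using Nat.strong_induction_on with
  | _ n ih =>
    intro a res h hsum
    by_cases hm : pyMax a > 0
    · have hm' : 1 ≤ pyMax a := hm
      simp only [evacLoop, if_pos hm]
      rw [takeOneAction_eq h, dec_bridge, joinChrA_eq]
      have hlt := sumPos_decN_lt h hm'
      have hpos := sumPos_pos h hm'
      obtain ⟨n', rfl⟩ : ∃ n', n = n' + 1 := ⟨n - 1, by omega⟩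
      have hne' : decN a ((idxGeN a (pyMax a)).take (kOf a)) ≠ [] := by
        intro he
        apply h
        apply List.eq_nil_of_length_eq_zero
        rw [← decN_length a ((idxGeN a (pyMax a)).take (kOf a)), he]
        rfl
      rw [ih n' (by omega) _ _ hne' (by omega)]
      rw [B_step h hm']
      simp
    · simp only [evacLoop, if_neg hm]
      rw [evac_alt_nil h (by omega)]
      simp

-- ===== VERDICT (by name: the statement is the Claim_ definition above) =====
theorem evac_spec : Claim_equal_evac := by
  intro a _ hpre
  unfold Spec_evac evac
  have h1 : (a.map Int.toNat).sum = sumPos a := rfl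
  rw [h1, loop_eq (sumPos a) a [] hpre le_rfl, List.nil_append]
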